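-- pv_equiv track=rewrite | github.com/Bbb4477/IAP401_EthereumTransactionAnomalyDetection | ApiPrototype1/main.py | calc_erc20_unique_addresses
-- ===== SOURCE A (Python) =====
-- def calc_erc20_unique_addresses(erc_txs, address):
--     sent_erc_txs = [tx for tx in erc_txs if tx['from'].lower() == address.lower()]
--     rec_erc_txs = [tx for tx in erc_txs if tx['to'].lower() == address.lower()]
--     uniq_sent_addr = len(set(tx['to'].lower() for tx in sent_erc_txs if tx['to']))
--     uniq_rec_addr = len(set(tx['from'].lower() for tx in rec_erc_txs))
--     uniq_sent_contract_addr = len(set(tx['contractAddress'].lower() for tx in sent_erc_txs if tx['contractAddress']))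
--     uniq_rec_contract_addr = len(set(tx['contractAddress'].lower() for tx in rec_erc_txs if tx['contractAddress']))
--     return uniq_sent_addr, uniq_rec_addr, uniq_sent_contract_addr, uniq_rec_contract_addr
-- ===== SOURCE B (Python) =====
-- def calc_erc20_unique_addresses(erc_txs, address):
--     a = address.lower()
--     sent_addr, rec_addr, sent_contract, rec_contract = set(), set(), set(), set()
--     for tx in erc_txs:
--         f = tx['from'].lower()
--         t = tx['to'].lower()
--         if f == a:
--             if tx['to']:
--                 sent_addr.add(t)
--             if tx['contractAddress']:
--                 sent_contract.add(tx['contractAddress'].lower())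
--         if t == a:
--             rec_addr.add(f)
--             if tx['contractAddress']:
--                 rec_contract.add(tx['contractAddress'].lower())
--     return len(sent_addr), len(rec_addr), len(sent_contract), len(rec_contract)
-- ===== Notes on version B (the rewrite author's own statement) =====
-- stated objective: simpler
-- what changed: Replaces the six list/set comprehensions (which scan erc_txs multiple times) with a single loop over erc_txs maintaining four sets, preserving the asymmetric falsy filters.
import Mathlib
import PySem

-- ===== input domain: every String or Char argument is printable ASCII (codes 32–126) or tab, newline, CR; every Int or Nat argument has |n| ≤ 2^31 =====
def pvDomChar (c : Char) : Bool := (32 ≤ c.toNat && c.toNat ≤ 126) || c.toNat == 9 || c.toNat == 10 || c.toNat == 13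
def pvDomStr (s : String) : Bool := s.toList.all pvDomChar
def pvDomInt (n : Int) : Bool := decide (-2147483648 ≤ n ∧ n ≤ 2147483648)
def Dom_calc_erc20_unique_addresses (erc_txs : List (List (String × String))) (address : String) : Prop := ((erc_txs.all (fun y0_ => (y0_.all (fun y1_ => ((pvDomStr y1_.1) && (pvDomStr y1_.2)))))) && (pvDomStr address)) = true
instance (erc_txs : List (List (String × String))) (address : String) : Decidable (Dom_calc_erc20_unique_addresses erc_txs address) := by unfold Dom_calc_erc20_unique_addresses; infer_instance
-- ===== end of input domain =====

-- B: one loop over erc_txs maintaining four sets instead of A's six comprehensions (simpler, single pass; same cost class).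


-- dict lookup (first match) with "" default; used under Pre_, which guarantees the key is present
def pvGet (tx : List (String × String)) (k : String) : String :=
  PySem.Dict.getD (PySem.Dict.mk tx) k ""

-- ===== PORT A =====
def calc_erc20_unique_addresses (erc_txs : List (List (String × String))) (address : String) : Int × Int × Int × Int :=
  let sent_erc_txs := erc_txs.filter (fun tx => PySem.Str.lower (pvGet tx "from") == PySem.Str.lower address)
  let rec_erc_txs := erc_txs.filter (fun tx => PySem.Str.lower (pvGet tx "to") == PySem.Str.lower address)
  let uniq_sent_addr := (PySem.Set.ofList ((sent_erc_txs.filter (fun tx => pvGet tx "to" != "")).map (fun tx => PySem.Str.lower (pvGet tx "to")))).length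
  let uniq_rec_addr := (PySem.Set.ofList (rec_erc_txs.map (fun tx => PySem.Str.lower (pvGet tx "from")))).length
  let uniq_sent_contract_addr := (PySem.Set.ofList ((sent_erc_txs.filter (fun tx => pvGet tx "contractAddress" != "")).map (fun tx => PySem.Str.lower (pvGet tx "contractAddress")))).length
  let uniq_rec_contract_addr := (PySem.Set.ofList ((rec_erc_txs.filter (fun tx => pvGet tx "contractAddress" != "")).map (fun tx => PySem.Str.lower (pvGet tx "contractAddress")))).length
  ((uniq_sent_addr : Int), (uniq_rec_addr : Int), (uniq_sent_contract_addr : Int), (uniq_rec_contract_addr : Int))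

-- ===== PORT B =====
def altStep (a : String) (st : PySem.Set String × PySem.Set String × PySem.Set String × PySem.Set String)
    (tx : List (String × String)) :
    PySem.Set String × PySem.Set String × PySem.Set String × PySem.Set String :=
  let f := PySem.Str.lower (pvGet tx "from")
  let t := PySem.Str.lower (pvGet tx "to")
  let s1 := if f == a && pvGet tx "to" != "" then PySem.Set.add st.1 t else st.1
  let s3 := if f == a && pvGet tx "contractAddress" != "" then PySem.Set.add st.2.2.1 (PySem.Str.lower (pvGet tx "contractAddress")) else st.2.2.1
  let s2 := if t == a then PySem.Set.add st.2.1 f else st.2.1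
  let s4 := if t == a && pvGet tx "contractAddress" != "" then PySem.Set.add st.2.2.2 (PySem.Str.lower (pvGet tx "contractAddress")) else st.2.2.2
  (s1, s2, s3, s4)

def calc_erc20_unique_addresses_alt (erc_txs : List (List (String × String))) (address : String) : Int × Int × Int × Int :=
  let a := PySem.Str.lower address
  let st := erc_txs.foldl (altStep a) (PySem.Set.empty, PySem.Set.empty, PySem.Set.empty, PySem.Set.empty)
  ((PySem.Set.len st.1 : Int), (PySem.Set.len st.2.1 : Int), (PySem.Set.len st.2.2.1 : Int), (PySem.Set.len st.2.2.2 : Int))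

-- ===== PRECONDITION & SPEC =====
-- Pre_ excludes exactly the inputs where Python A raises KeyError: a tx missing 'from' or 'to',
-- or a sent/received tx missing 'contractAddress'.
def Pre_calc_erc20_unique_addresses (erc_txs : List (List (String × String))) (address : String) : Prop :=
  ∀ tx ∈ erc_txs, "from" ∈ tx.map Prod.fst ∧ "to" ∈ tx.map Prod.fst ∧
    ((PySem.Str.lower (pvGet tx "from") = PySem.Str.lower address ∨
      PySem.Str.lower (pvGet tx "to") = PySem.Str.lower address) → "contractAddress" ∈ tx.map Prod.fst)
instance (erc_txs : List (List (String × String))) (address : String) : Decidable (Pre_calc_erc20_unique_addresses erc_txs address) := by unfold Pre_calc_erc20_unique_addresses; infer_instance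

def pvWitness_calc_erc20_unique_addresses : (List (List (String × String))) × String :=
  ([[("from", "0xAb"), ("to", "0xCd"), ("contractAddress", "0xEf")]], "0xab")

def Spec_calc_erc20_unique_addresses (erc_txs : List (List (String × String))) (address : String) (out : Int × Int × Int × Int) : Prop := out = calc_erc20_unique_addresses_alt erc_txs address
instance (erc_txs : List (List (String × String))) (address : String) (out : Int × Int × Int × Int) : Decidable (Spec_calc_erc20_unique_addresses erc_txs address out) := by unfold Spec_calc_erc20_unique_addresses; infer_instance

-- ===== CLAIM (what is proved, stated in full; the proofs are below) =====
def Claim_equal_calc_erc20_unique_addresses : Prop := ∀ (erc_txs : List (List (String × String))) (address : String), Dom_calc_erc20_unique_addresses erc_txs address → Pre_calc_erc20_unique_addresses erc_txs address → Spec_calc_erc20_unique_addresses erc_txs address (calc_erc20_unique_addresses erc_txs address)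

-- ===== LEMMAS AND PROOFS =====

-- a fold that conditionally adds g tx equals folding Set.add over the filtered, mapped list
theorem fold_cond_add {τ : Type} (q : τ → Bool) (g : τ → String) :
    ∀ (xs : List τ) (s : PySem.Set String),
      xs.foldl (fun s tx => if q tx then PySem.Set.add s (g tx) else s) s
        = ((xs.filter q).map g).foldl PySem.Set.add s := by
  intro xs
  induction xs with
  | nil => intro s; rfl
  | cons hd tl ih =>
    intro s
    by_cases h : q hd
    · simp [List.foldl, h, ih]
    · simp [List.foldl, h, ih]

-- the fused fold splits into four independent conditional-add folds
theorem fold_split (a : String) :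
    ∀ (xs : List (List (String × String)))
      (s1 s2 s3 s4 : PySem.Set String),
      xs.foldl (altStep a) (s1, s2, s3, s4) =
        (xs.foldl (fun s tx => if (PySem.Str.lower (pvGet tx "from") == a) && (pvGet tx "to" != "") then PySem.Set.add s (PySem.Str.lower (pvGet tx "to")) else s) s1,
         xs.foldl (fun s tx => if PySem.Str.lower (pvGet tx "to") == a then PySem.Set.add s (PySem.Str.lower (pvGet tx "from")) else s) s2,
         xs.foldl (fun s tx => if (PySem.Str.lower (pvGet tx "from") == a) && (pvGet tx "contractAddress" != "") then PySem.Set.add s (PySem.Str.lower (pvGet tx "contractAddress")) else s) s3,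
         xs.foldl (fun s tx => if (PySem.Str.lower (pvGet tx "to") == a) && (pvGet tx "contractAddress" != "") then PySem.Set.add s (PySem.Str.lower (pvGet tx "contractAddress")) else s) s4) := by
  intro xs
  induction xs with
  | nil => intro s1 s2 s3 s4; rfl
  | cons hd tl ih =>
    intro s1 s2 s3 s4
    simp only [List.foldl]
    rw [show altStep a (s1, s2, s3, s4) hd = (_, _, _, _) from rfl, ih]

-- ===== VERDICT (by name: the statement is the Claim_ definition above) =====
theorem calc_erc20_unique_addresses_spec : Claim_equal_calc_erc20_unique_addresses := by
  intro erc_txs address _ _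
  unfold Spec_calc_erc20_unique_addresses
  unfold calc_erc20_unique_addresses calc_erc20_unique_addresses_alt
  simp only [fold_split, ← fold_cond_add, PySem.Set.ofList_eq_foldl, List.filter_filter,
    PySem.Set.len, PySem.Set.empty, Bool.and_comm]
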